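-- pv_equiv track=rewrite | github.com/muhmikail22-code/mywife | vadd_bot.py | sort_xl_vidio_first
-- ===== SOURCE A (Python) =====
-- def sort_xl_vidio_first(packages):
--     vidio_qris = "ZVdMVXcyKzdJRlJERVdJc1hpVUhmQQ"
--     vidio_pulsa = "MTJLR28vN3VpUmxObFdHelZwRnVUUQ"
--     vidio_items = []
--     other_items = []
--     for pkg in packages:
--         if pkg.get('package_id') in [vidio_pulsa, vidio_qris]:
--             vidio_items.append(pkg)
--         else:
--             other_items.append(pkg)
--     ordered = [pkg for pkg in vidio_items if pkg.get('package_id') == vidio_pulsa] + \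
--               [pkg for pkg in vidio_items if pkg.get('package_id') == vidio_qris] + \
--               other_items
--     return ordered
-- ===== SOURCE B (Python) =====
-- def sort_xl_vidio_first(packages):
--     vidio_qris = "ZVdMVXcyKzdJRlJERVdJc1hpVUhmQQ"
--     vidio_pulsa = "MTJLR28vN3VpUmxObFdHelZwRnVUUQ"
--     def rank(pkg):
--         pid = pkg.get('package_id')
--         if pid == vidio_pulsa:
--             return 0
--         if pid == vidio_qris:
--             return 1
--         return 2
--     return sorted(packages, key=rank)
-- ===== Notes on version B (the rewrite author's own statement) =====
-- stated objective: idiomatic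
-- what changed: B assigns each package a priority key (0 pulsa, 1 qris, 2 other) and returns a single stable sorted() by that key, replacing A's bucket-split plus two re-filtering comprehension passes and list concatenation.
import Mathlib
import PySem

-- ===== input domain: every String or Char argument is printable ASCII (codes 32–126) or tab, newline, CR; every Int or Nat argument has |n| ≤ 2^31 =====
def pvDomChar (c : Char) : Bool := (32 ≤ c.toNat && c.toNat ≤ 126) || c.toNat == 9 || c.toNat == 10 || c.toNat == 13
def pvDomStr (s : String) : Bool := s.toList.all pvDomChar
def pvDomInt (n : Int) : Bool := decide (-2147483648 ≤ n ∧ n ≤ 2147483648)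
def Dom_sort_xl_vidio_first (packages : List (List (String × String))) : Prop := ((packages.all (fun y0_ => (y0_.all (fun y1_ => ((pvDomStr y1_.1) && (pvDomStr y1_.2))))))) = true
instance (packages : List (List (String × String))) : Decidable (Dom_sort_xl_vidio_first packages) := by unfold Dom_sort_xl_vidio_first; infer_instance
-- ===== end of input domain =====

-- B replaces A's bucket split plus two re-filtering passes with one stable
-- sorted() by a priority key (0 pulsa, 1 qris, 2 other) — idiomatic, same result.

-- ===== PORT A =====
def sort_xl_vidio_first (packages : List (List (String × String))) : List (List (String × String)) :=
  let vidio_qris := "ZVdMVXcyKzdJRlJERVdJc1hpVUhmQQ"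
  let vidio_pulsa := "MTJLR28vN3VpUmxObFdHelZwRnVUUQ"
  let split := packages.foldl (fun (acc : List (List (String × String)) × List (List (String × String))) pkg =>
      if (PySem.Dict.mk pkg).get? "package_id" = some vidio_pulsa ∨
         (PySem.Dict.mk pkg).get? "package_id" = some vidio_qris then
        (acc.1 ++ [pkg], acc.2)
      else
        (acc.1, acc.2 ++ [pkg])) ([], [])
  (split.1.filter (fun pkg => (PySem.Dict.mk pkg).get? "package_id" == some vidio_pulsa)) ++
  (split.1.filter (fun pkg => (PySem.Dict.mk pkg).get? "package_id" == some vidio_qris)) ++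
  split.2

-- ===== PORT B =====
def sort_xl_vidio_first_alt (packages : List (List (String × String))) : List (List (String × String)) :=
  let vidio_qris := "ZVdMVXcyKzdJRlJERVdJc1hpVUhmQQ"
  let vidio_pulsa := "MTJLR28vN3VpUmxObFdHelZwRnVUUQ"
  let rank := fun (pkg : List (String × String)) =>
    let pid := (PySem.Dict.mk pkg).get? "package_id"
    if pid = some vidio_pulsa then (0 : Int)
    else if pid = some vidio_qris then 1
    else 2
  PySem.List.sorted packages rank false

-- ===== PRECONDITION & SPEC =====
def Spec_sort_xl_vidio_first (packages : List (List (String × String))) (out : List (List (String × String))) : Prop := out = sort_xl_vidio_first_alt packages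
instance (packages : List (List (String × String))) (out : List (List (String × String))) : Decidable (Spec_sort_xl_vidio_first packages out) := by unfold Spec_sort_xl_vidio_first; infer_instance

-- ===== CLAIM (what is proved, stated in full; the proofs are below) =====
def Claim_equal_sort_xl_vidio_first : Prop := ∀ (packages : List (List (String × String))), Dom_sort_xl_vidio_first packages → Spec_sort_xl_vidio_first packages (sort_xl_vidio_first packages)

-- ===== LEMMAS AND PROOFS =====

-- proof-only abbreviations: the two package-id tests and B's priority key
def pvP (pkg : List (String × String)) : Bool :=
  (PySem.Dict.mk pkg).get? "package_id" == some "MTJLR28vN3VpUmxObFdHelZwRnVUUQ"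
def pvQ (pkg : List (String × String)) : Bool :=
  (PySem.Dict.mk pkg).get? "package_id" == some "ZVdMVXcyKzdJRlJERVdJc1hpVUhmQQ"
def pvRank (pkg : List (String × String)) : Int :=
  if (PySem.Dict.mk pkg).get? "package_id" = some "MTJLR28vN3VpUmxObFdHelZwRnVUUQ" then 0
  else if (PySem.Dict.mk pkg).get? "package_id" = some "ZVdMVXcyKzdJRlJERVdJc1hpVUhmQQ" then 1
  else 2

-- A's split fold computes a pair of filters
theorem pvFoldA (l : List (List (String × String)))
    (v o : List (List (String × String))) :
    l.foldl (fun (acc : List (List (String × String)) × List (List (String × String))) pkg =>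
      if (PySem.Dict.mk pkg).get? "package_id" = some "MTJLR28vN3VpUmxObFdHelZwRnVUUQ" ∨
         (PySem.Dict.mk pkg).get? "package_id" = some "ZVdMVXcyKzdJRlJERVdJc1hpVUhmQQ" then
        (acc.1 ++ [pkg], acc.2)
      else
        (acc.1, acc.2 ++ [pkg])) (v, o)
    = (v ++ l.filter (fun pkg => pvP pkg || pvQ pkg),
       o ++ l.filter (fun pkg => !(pvP pkg || pvQ pkg))) := by
  induction l generalizing v o with
  | nil => simp
  | cons h t ih =>
    by_cases hc : (PySem.Dict.mk h).get? "package_id" = some "MTJLR28vN3VpUmxObFdHelZwRnVUUQ" ∨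
                  (PySem.Dict.mk h).get? "package_id" = some "ZVdMVXcyKzdJRlJERVdJc1hpVUhmQQ"
    · have hb : (pvP h || pvQ h) = true := by simp [pvP, pvQ]; tauto
      simp only [List.foldl_cons, if_pos hc, ih, List.filter_cons, hb]
      simp
    · have hb : (pvP h || pvQ h) = false := by
        simp only [not_or] at hc
        simp [pvP, pvQ]; tauto
      simp only [List.foldl_cons, if_neg hc, ih, List.filter_cons, hb]
      simp

-- insertBy skips a prefix of elements it does not go before
theorem pvInsertBy_skip {α : Type} (bf : α → α → Bool) (x : α) (p r : List α)
    (h : ∀ y ∈ p, bf x y = false) :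
    PySem.List.insertBy bf x (p ++ r) = p ++ PySem.List.insertBy bf x r := by
  induction p with
  | nil => simp
  | cons hd tl ih =>
    have hhd : bf x hd = false := h hd (List.mem_cons_self)
    simp only [List.cons_append, PySem.List.insertBy, hhd]
    simp [ih (fun y hy => h y (List.mem_cons_of_mem _ hy))]

-- insertBy prepends when it goes before the head (or the list is empty)
theorem pvInsertBy_front {α : Type} (bf : α → α → Bool) (x : α) (r : List α)
    (h : ∀ hd tl, r = hd :: tl → bf x hd = true) :
    PySem.List.insertBy bf x r = x :: r := by
  cases r with
  | nil => simp [PySem.List.insertBy]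
  | cons hd tl => simp [PySem.List.insertBy, h hd tl rfl]

-- the insertion-sort fold by pvRank maintains three rank buckets
theorem pvSortFold (xs a0 a1 a2 : List (List (String × String)))
    (h0 : ∀ y ∈ a0, pvRank y = 0) (h1 : ∀ y ∈ a1, pvRank y = 1) (h2 : ∀ y ∈ a2, pvRank y = 2) :
    xs.foldl (fun acc x => PySem.List.insertBy (fun a b => decide (pvRank a < pvRank b)) x acc)
      (a0 ++ a1 ++ a2)
    = (a0 ++ xs.filter (fun y => pvRank y == 0)) ++ (a1 ++ xs.filter (fun y => pvRank y == 1))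
        ++ (a2 ++ xs.filter (fun y => pvRank y == 2)) := by
  induction xs generalizing a0 a1 a2 with
  | nil => simp
  | cons x t ih =>
    have hr : pvRank x = 0 ∨ pvRank x = 1 ∨ pvRank x = 2 := by
      unfold pvRank; split_ifs <;> simp
    rcases hr with hx | hx | hx
    · have hins : PySem.List.insertBy (fun a b => decide (pvRank a < pvRank b)) x (a0 ++ a1 ++ a2)
          = (a0 ++ [x]) ++ a1 ++ a2 := by
        rw [List.append_assoc,
          pvInsertBy_skip _ _ a0 (a1 ++ a2) (by intro y hy; simp [h0 y hy, hx]),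
          pvInsertBy_front _ _ (a1 ++ a2) (by
            intro hd tl heq
            have hhd : hd ∈ a1 ++ a2 := by rw [heq]; exact List.mem_cons_self
            rcases List.mem_append.mp hhd with hm | hm
            · simp [h1 hd hm, hx]
            · simp [h2 hd hm, hx])]
        simp
      rw [List.foldl_cons, hins,
        ih (a0 ++ [x]) a1 a2
          (by intro y hy; rcases List.mem_append.mp hy with hm | hm
              · exact h0 y hm
              · simp at hm; simp [hm, hx]) h1 h2]
      simp [hx]
    · have hins : PySem.List.insertBy (fun a b => decide (pvRank a < pvRank b)) x (a0 ++ a1 ++ a2)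
          = a0 ++ (a1 ++ [x]) ++ a2 := by
        rw [pvInsertBy_skip _ _ (a0 ++ a1) a2 (by
            intro y hy
            rcases List.mem_append.mp hy with hm | hm
            · simp [h0 y hm, hx]
            · simp [h1 y hm, hx]),
          pvInsertBy_front _ _ a2 (by
            intro hd tl heq
            have hhd : hd ∈ a2 := by rw [heq]; exact List.mem_cons_self
            simp [h2 hd hhd, hx])]
        simp
      rw [List.foldl_cons, hins,
        ih a0 (a1 ++ [x]) a2 h0
          (by intro y hy; rcases List.mem_append.mp hy with hm | hm
              · exact h1 y hm
              · simp at hm; simp [hm, hx]) h2]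
      simp [hx]
    · have hins : PySem.List.insertBy (fun a b => decide (pvRank a < pvRank b)) x (a0 ++ a1 ++ a2)
          = a0 ++ a1 ++ (a2 ++ [x]) := by
        have := pvInsertBy_skip (fun a b => decide (pvRank a < pvRank b)) x (a0 ++ a1 ++ a2) [] (by
          intro y hy
          rcases List.mem_append.mp hy with hm | hm
          · rcases List.mem_append.mp hm with hm' | hm'
            · simp [h0 y hm', hx]
            · simp [h1 y hm', hx]
          · have h2y := h2 y hm
            simp [h2y, hx])
        simp only [List.append_nil] at this
        rw [this]
        simp [PySem.List.insertBy]
      rw [List.foldl_cons, hins,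
        ih a0 a1 (a2 ++ [x]) h0 h1
          (by intro y hy; rcases List.mem_append.mp hy with hm | hm
              · exact h2 y hm
              · simp at hm; simp [hm, hx])]
      simp [hx]

-- ===== VERDICT (by name: the statement is the Claim_ definition above) =====
theorem sort_xl_vidio_first_spec : Claim_equal_sort_xl_vidio_first := by
  intro packages _
  show sort_xl_vidio_first packages = sort_xl_vidio_first_alt packages
  simp only [sort_xl_vidio_first, sort_xl_vidio_first_alt]
  rw [pvFoldA]
  have hsort : PySem.List.sorted packages pvRank false
      = (packages.filter (fun y => pvRank y == 0)) ++ (packages.filter (fun y => pvRank y == 1))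
          ++ (packages.filter (fun y => pvRank y == 2)) := by
    have := pvSortFold packages [] [] [] (by simp) (by simp) (by simp)
    simpa [PySem.List.sorted_eq_foldl_insertBy] using this
  have hkey : (fun (pkg : List (String × String)) =>
      let pid := (PySem.Dict.mk pkg).get? "package_id"
      if pid = some "MTJLR28vN3VpUmxObFdHelZwRnVUUQ" then (0 : Int)
      else if pid = some "ZVdMVXcyKzdJRlJERVdJc1hpVUhmQQ" then 1
      else 2) = pvRank := by
    funext pkg; simp [pvRank]
  rw [hkey, hsort]
  simp only [List.nil_append, List.filter_filter]
  have e0 : List.filter (fun a => ((PySem.Dict.mk a).get? "package_id" == some "MTJLR28vN3VpUmxObFdHelZwRnVUUQ" && (pvP a || pvQ a))) packages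
      = List.filter (fun y => pvRank y == 0) packages := by
    apply List.filter_congr; intro x _
    simp only [pvP, pvQ, pvRank]
    by_cases h : (PySem.Dict.mk x).get? "package_id" = some "MTJLR28vN3VpUmxObFdHelZwRnVUUQ" <;>
      simp [h] <;> split_ifs <;> simp_all
  have e1 : List.filter (fun a => ((PySem.Dict.mk a).get? "package_id" == some "ZVdMVXcyKzdJRlJERVdJc1hpVUhmQQ" && (pvP a || pvQ a))) packages
      = List.filter (fun y => pvRank y == 1) packages := by
    apply List.filter_congr; intro x _
    simp only [pvP, pvQ, pvRank]
    by_cases hp : (PySem.Dict.mk x).get? "package_id" = some "MTJLR28vN3VpUmxObFdHelZwRnVUUQ" <;>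
      by_cases hq : (PySem.Dict.mk x).get? "package_id" = some "ZVdMVXcyKzdJRlJERVdJc1hpVUhmQQ" <;>
      simp_all
  have e2 : List.filter (fun pkg => !(pvP pkg || pvQ pkg)) packages
      = List.filter (fun y => pvRank y == 2) packages := by
    apply List.filter_congr; intro x _
    simp only [pvP, pvQ, pvRank]
    by_cases hp : (PySem.Dict.mk x).get? "package_id" = some "MTJLR28vN3VpUmxObFdHelZwRnVUUQ" <;>
      by_cases hq : (PySem.Dict.mk x).get? "package_id" = some "ZVdMVXcyKzdJRlJERVdJc1hpVUhmQQ" <;>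
      simp_all
  rw [e0, e1, e2]
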